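-- pv_equiv track=rewrite | github.com/BaptisteClaudon/Polylog_MCX-public | .ipynb_checkpoints/polylog_mcx-checkpoint.py | associate_ancillae
-- ===== SOURCE A (Python) =====
-- def associate_ancillae(registers):
--     even_regs = [registers[i] for i in range(2, len(registers)) if i % 2 == 0]
--     odd_regs = [registers[i] for i in range(1, len(registers)) if i % 2 == 1]
--     even_ancillae = []
--     c = 0
--     while len(even_ancillae) < len(even_regs):
--         local = odd_regs[c]
--         for l in local:
--             even_ancillae.append(l)
--         c += 1
--     odd_ancillae = []
--     c = 0
--     while len(odd_ancillae) < len(odd_regs):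
--         local = even_regs[c]
--         for l in local:
--             odd_ancillae.append(l)
--         c += 1
--     ancillae = [0]
--     for k in range(1, len(registers)):
--         if k % 2 == 0:
--             ancillae.append(even_ancillae[0])
--             even_ancillae.pop(0)
--         if k % 2 == 1:
--             ancillae.append(odd_ancillae[0])
--             odd_ancillae.pop(0)
--     return ancillae
-- ===== SOURCE B (Python) =====
-- def associate_ancillae(registers):
--     n = len(registers)
--     E = [x for i in range(1, n, 2) for x in registers[i]]
--     O = [x for i in range(2, n, 2) for x in registers[i]]
--     return [0] + [O[(k - 1) // 2] if k % 2 else E[k // 2 - 1] for k in range(1, n)]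
-- ===== Notes on version B (the rewrite author's own statement) =====
-- stated objective: simpler
-- what changed: A builds two count-controlled while-loops that concatenate register groups and a third loop that pops ancillae from the front by parity; B flattens the odd-indexed and even-indexed (>=2) registers once and builds the result directly by indexing the two flat streams, with no while loops and no pops.
import Mathlib
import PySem

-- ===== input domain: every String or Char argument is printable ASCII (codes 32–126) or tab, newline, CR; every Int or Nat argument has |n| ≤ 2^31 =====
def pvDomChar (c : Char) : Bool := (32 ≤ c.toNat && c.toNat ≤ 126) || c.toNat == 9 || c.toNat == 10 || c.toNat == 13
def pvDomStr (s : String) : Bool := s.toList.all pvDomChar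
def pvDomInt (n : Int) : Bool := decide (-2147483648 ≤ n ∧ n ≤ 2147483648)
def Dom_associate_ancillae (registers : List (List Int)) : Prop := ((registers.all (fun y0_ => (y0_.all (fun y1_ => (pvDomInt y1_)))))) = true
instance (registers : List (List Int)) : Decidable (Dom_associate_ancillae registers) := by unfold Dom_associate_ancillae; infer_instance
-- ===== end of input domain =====

-- B replaces A's two count-controlled while-loops plus the front-popping parity loop by
-- flattening the odd-/even-indexed registers once and indexing those flat streams directly
-- (objective: simpler). Equivalence is proved on Pre_ (the inputs where A does not raise).

-- ===== PORT A =====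
-- A's 'while len(acc) < target: local = groups[c]; for l in local: acc.append(l); c += 1'.
-- When groups runs out Python raises IndexError (groups[c]); excluded by Pre_, here we stop.
def pvFill (target : Nat) (acc : List Int) (groups : List (List Int)) : List Int :=
  if target ≤ acc.length then acc
  else
    match groups with
    | [] => acc
    | g :: gs => pvFill target (acc ++ g) gs

-- one step of A's final loop: append the head of the parity-matching ancilla list and pop it.
-- 'even_ancillae[0]' raises on an empty list in Python; excluded by Pre_, here getD 0.
def pvStep (st : List Int × List Int × List Int) (k : Int) : List Int × List Int × List Int :=
  let (anc, ev, od) := st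
  if PySem.Int.mod k 2 == 0 then
    (anc ++ [(PySem.List.pyGet? ev 0).getD 0], ev.tail, od)
  else if PySem.Int.mod k 2 == 1 then
    (anc ++ [(PySem.List.pyGet? od 0).getD 0], ev, od.tail)
  else st

def associate_ancillae (registers : List (List Int)) : List Int :=
  let n : Int := registers.length
  let even_regs := ((PySem.List.pyRange 2 n 1).filter
      (fun i => PySem.Int.mod i 2 == 0)).map (fun i => PySem.List.pyGetD registers i [])
  let odd_regs := ((PySem.List.pyRange 1 n 1).filter
      (fun i => PySem.Int.mod i 2 == 1)).map (fun i => PySem.List.pyGetD registers i [])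
  let even_ancillae := pvFill even_regs.length [] odd_regs
  let odd_ancillae := pvFill odd_regs.length [] even_regs
  ((PySem.List.pyRange 1 n 1).foldl pvStep ([0], even_ancillae, odd_ancillae)).1

-- ===== PORT B =====
def associate_ancillae_alt (registers : List (List Int)) : List Int :=
  let n : Int := registers.length
  let E := (PySem.List.pyRange 1 n 2).flatMap (fun i => PySem.List.pyGetD registers i [])
  let O := (PySem.List.pyRange 2 n 2).flatMap (fun i => PySem.List.pyGetD registers i [])
  [0] ++ (PySem.List.pyRange 1 n 1).map (fun k =>
    if PySem.Int.mod k 2 == 1 then PySem.List.pyGetD O (PySem.Int.floordiv (k - 1) 2) 0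
    else PySem.List.pyGetD E (PySem.Int.floordiv k 2 - 1) 0)

-- ===== PRECONDITION & SPEC =====
-- Pre_ = exactly the inputs where A returns: both flattened parity streams hold at least as
-- many elements as the opposite parity class has registers; otherwise A's while loops run
-- past the end of their source list and Python raises IndexError.
def Pre_associate_ancillae (registers : List (List Int)) : Prop :=
  (registers.length - 1) / 2 ≤
    ((PySem.List.pyRange 1 registers.length 2).flatMap
      (fun i => PySem.List.pyGetD registers i [])).length ∧
  registers.length / 2 ≤
    ((PySem.List.pyRange 2 registers.length 2).flatMap
      (fun i => PySem.List.pyGetD registers i [])).length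
instance (registers : List (List Int)) : Decidable (Pre_associate_ancillae registers) := by
  unfold Pre_associate_ancillae; infer_instance

def pvWitness_associate_ancillae : List (List Int) := [[], [5], [7, 8], [6]]

def Spec_associate_ancillae (registers : List (List Int)) (out : List Int) : Prop := out = associate_ancillae_alt registers
instance (registers : List (List Int)) (out : List Int) : Decidable (Spec_associate_ancillae registers out) := by unfold Spec_associate_ancillae; infer_instance

-- ===== CLAIM (what is proved, stated in full; the proofs are below) =====
def Claim_equal_associate_ancillae : Prop := ∀ (registers : List (List Int)), Dom_associate_ancillae registers → Pre_associate_ancillae registers → Spec_associate_ancillae registers (associate_ancillae registers)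

-- ===== LEMMAS AND PROOFS =====

-- step-2 range as a map over List.range
theorem pvRange2 (a : Int) (m : Nat) :
    PySem.List.pyRange a (a + m) 2
      = (List.range ((m + 1) / 2)).map (fun k : Nat => a + 2 * (k : Int)) := by
  rw [PySem.List.pyRange_of_pos a (a + m) (by omega)]
  congr 1
  · congr 1
    split_ifs with h <;> omega

-- the parity filter of a unit-step range is the step-2 range
theorem pvFilterParity (a : Int) (m : Nat) :
    (PySem.List.pyRange a (a + m) 1).filter (fun i => PySem.Int.mod i 2 == PySem.Int.mod a 2)
      = PySem.List.pyRange a (a + m) 2 := by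
  induction m with
  | zero =>
    rw [PySem.List.pyRange_one_eq_nil (by omega), pvRange2]
    simp
  | succ m ih =>
    have h1 : a + ((m + 1 : Nat) : Int) = (a + m) + 1 := by push_cast; ring
    rw [h1, PySem.List.pyRange_one_succ_right (by omega), List.filter_append, ih, ← h1,
      pvRange2 a (m + 1), pvRange2 a m]
    rcases Nat.even_or_odd m with ⟨t, rfl⟩ | ⟨t, rfl⟩
    · have hc : ((t + t) + 1 + 1) / 2 = ((t + t) + 1) / 2 + 1 := by omega
      rw [hc, List.range_succ, List.map_append]
      have hcond : (PySem.Int.mod (a + ((t + t : Nat) : Int)) 2 == PySem.Int.mod a 2) = true := by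
        simp only [PySem.Int.mod_eq_emod_of_pos (by omega : (0:Int) < 2), beq_iff_eq]
        push_cast; omega
      simp only [List.filter_cons, hcond, if_pos, List.filter_nil, List.map_cons, List.map_nil]
      have h3 : a + 2 * (((t + t + 1) / 2 : Nat) : Int) = a + ((t + t : Nat) : Int) := by
        push_cast; omega
      rw [h3]
    · have hc : ((2 * t + 1) + 1 + 1) / 2 = ((2 * t + 1) + 1) / 2 := by omega
      rw [hc]
      have hcond : (PySem.Int.mod (a + ((2 * t + 1 : Nat) : Int)) 2 == PySem.Int.mod a 2) = false := by
        simp only [PySem.Int.mod_eq_emod_of_pos (by omega : (0:Int) < 2), beq_eq_false_iff_ne,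
          ne_eq]
        push_cast; omega
      rw [List.filter_cons, hcond]
      simp

-- pvFill produces a prefix of acc ++ flatten groups …
theorem pvFill_prefix (groups : List (List Int)) (acc : List Int) (t : Nat) :
    pvFill t acc groups <+: acc ++ groups.flatten := by
  induction groups generalizing acc with
  | nil =>
    unfold pvFill
    split_ifs <;> simp
  | cons g gs ih =>
    unfold pvFill
    split_ifs
    · simp
    · simpa using ih (acc ++ g)

-- … of length at least t when the source suffices
theorem pvFill_length (groups : List (List Int)) (acc : List Int) (t : Nat)
    (h : t ≤ acc.length + groups.flatten.length) : t ≤ (pvFill t acc groups).length := by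
  induction groups generalizing acc with
  | nil =>
    unfold pvFill
    split_ifs with hle
    · exact hle
    · simpa using h
  | cons g gs ih =>
    unfold pvFill
    split_ifs with hle
    · exact hle
    · exact ih (acc ++ g) (by simp at h ⊢; omega)

-- the element a prefix and its extension agree on
theorem pvPrefix_getD (l1 l2 : List Int) (h : l1 <+: l2) (i : Nat) (hi : i < l1.length) :
    l1.getD i 0 = l2.getD i 0 := by
  obtain ⟨t, rfl⟩ := h
  rw [List.getD_eq_getElem _ _ hi, List.getD_eq_getElem _ _ (by simp; omega)]
  simp [List.getElem_append_left hi]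

-- the popped head of a partially consumed list, by absolute index
theorem pvHeadD (l : List Int) (e : Nat) :
    (PySem.List.pyGet? (l.drop e) 0).getD 0 = l.getD e 0 := by
  simp only [PySem.List.pyGet?, PySem.List.pyIdx?, List.getD_eq_getElem?_getD]
  rcases Nat.lt_or_ge e l.length with h | h
  · rw [if_pos (by decide), if_pos (by simp; omega)]
    simp
  · rw [if_pos (by decide), if_neg (by simp; omega)]
    simp [List.getElem?_eq_none (by omega : l.length ≤ e)]

-- characterisation of A's final loop: it interleaves the two ancilla lists by absolute index
theorem pvFold_char (m : Nat) (ev od : List Int) :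
    (PySem.List.pyRange 1 (1 + (m : Int)) 1).foldl pvStep ([0], ev, od)
      = ([0] ++ (PySem.List.pyRange 1 (1 + (m : Int)) 1).map (fun k =>
            if PySem.Int.mod k 2 == 0 then ev.getD (PySem.Int.floordiv k 2 - 1).toNat 0
            else od.getD (PySem.Int.floordiv (k - 1) 2).toNat 0),
         ev.drop (m / 2), od.drop ((m + 1) / 2)) := by
  induction m with
  | zero =>
    rw [PySem.List.pyRange_one_eq_nil (by omega)]
    simp
  | succ m ih =>
    have h1 : (1 : Int) + ((m + 1 : Nat) : Int) = (1 + (m : Int)) + 1 := by push_cast; ring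
    rw [h1, PySem.List.pyRange_one_succ_right (by omega), List.foldl_append, List.map_append,
      ih]
    simp only [List.foldl_cons, List.foldl_nil, List.map_cons, List.map_nil]
    rcases Nat.even_or_odd m with ⟨t, rfl⟩ | ⟨t, rfl⟩
    · -- m = t + t, so k = 1 + m is odd: pop from od
      have hk : PySem.Int.mod (1 + ((t + t : Nat) : Int)) 2 = 1 := by
        rw [PySem.Int.mod_eq_emod_of_pos (by omega)]; push_cast; omega
      simp only [pvStep, hk]
      norm_num
      refine ⟨?_, ?_, ?_⟩
      · rw [pvHeadD, List.getD_eq_getElem?_getD]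
        have h4 : (((t : Int) + t) / 2).toNat = (t + t + 1) / 2 := by omega
        rw [h4]
      · congr 1
        omega
      · omega
    · -- m = 2t + 1, so k = 1 + m is even: pop from ev
      have hk : PySem.Int.mod (1 + ((2 * t + 1 : Nat) : Int)) 2 = 0 := by
        rw [PySem.Int.mod_eq_emod_of_pos (by omega)]; push_cast; omega
      simp only [pvStep, hk]
      norm_num
      refine ⟨?_, ?_, ?_⟩
      · rw [pvHeadD, List.getD_eq_getElem?_getD]
        have h4 : ((1 + (2 * (t : Int) + 1)) / 2).toNat - 1 = (2 * t + 1) / 2 := by omega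
        rw [h4]
      · omega
      · congr 1
        omega

-- length of a step-2 range
theorem pvLen2 (a b : Int) :
    (PySem.List.pyRange a b 2).length = if a < b then ((b - a + 1) / 2).toNat else 0 := by
  rw [PySem.List.pyRange_of_pos a b (by omega)]
  have h : b - a + 2 - 1 = b - a + 1 := by ring
  simp [h]

-- A's even-index comprehension filter is the step-2 range from 2
theorem pvFilterEven (n : Nat) :
    (PySem.List.pyRange 2 (n : Int) 1).filter (fun i => PySem.Int.mod i 2 == 0)
      = PySem.List.pyRange 2 (n : Int) 2 := by
  rcases Nat.lt_or_ge n 2 with h | h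
  · rw [PySem.List.pyRange_one_eq_nil (by omega),
      PySem.List.pyRange_of_pos _ _ (by omega : (0:Int) < 2), if_neg (by omega)]
    simp
  · obtain ⟨m, rfl⟩ : ∃ m : Nat, n = 2 + m := ⟨n - 2, by omega⟩
    have h2 : ((2 + m : Nat) : Int) = 2 + (m : Int) := by push_cast; ring
    have := pvFilterParity 2 m
    have h0 : PySem.Int.mod 2 2 = 0 := by decide
    simp only [h0] at this
    rw [h2, this]

-- A's odd-index comprehension filter is the step-2 range from 1
theorem pvFilterOdd (n : Nat) :
    (PySem.List.pyRange 1 (n : Int) 1).filter (fun i => PySem.Int.mod i 2 == 1)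
      = PySem.List.pyRange 1 (n : Int) 2 := by
  rcases Nat.lt_or_ge n 1 with h | h
  · rw [PySem.List.pyRange_one_eq_nil (by omega),
      PySem.List.pyRange_of_pos _ _ (by omega : (0:Int) < 2), if_neg (by omega)]
    simp
  · obtain ⟨m, rfl⟩ : ∃ m : Nat, n = 1 + m := ⟨n - 1, by omega⟩
    have h2 : ((1 + m : Nat) : Int) = 1 + (m : Int) := by push_cast; ring
    have := pvFilterParity 1 m
    have h0 : PySem.Int.mod 1 2 = 1 := by decide
    simp only [h0] at this
    rw [h2, this]

-- the heart of the equivalence: A's value equals B's value on every input Pre_ admits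
theorem pv_main (registers : List (List Int)) (hpre : Pre_associate_ancillae registers) :
    associate_ancillae registers = associate_ancillae_alt registers := by
  obtain ⟨hE, hO⟩ := hpre
  rw [List.flatMap_def] at hE hO
  rcases Nat.eq_zero_or_pos registers.length with h0 | hpos
  · rw [List.length_eq_zero_iff.mp h0]
    rfl
  · obtain ⟨m, hm⟩ : ∃ m : Nat, registers.length = 1 + m := ⟨registers.length - 1, by omega⟩
    simp only [associate_ancillae, associate_ancillae_alt]
    rw [pvFilterEven registers.length, pvFilterOdd registers.length, List.flatMap_def,
      List.flatMap_def]
    set LE := (PySem.List.pyRange 1 (registers.length : Int) 2).map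
        (fun i => PySem.List.pyGetD registers i []) with hLE
    set LO := (PySem.List.pyRange 2 (registers.length : Int) 2).map
        (fun i => PySem.List.pyGetD registers i []) with hLO
    have hcast : ((registers.length : Nat) : Int) = 1 + (m : Int) := by omega
    rw [hcast, pvFold_char m]
    have hlenE : LE.length = registers.length / 2 := by
      rw [hLE, List.length_map, pvLen2]
      split_ifs <;> omega
    have hlenO : LO.length = (registers.length - 1) / 2 := by
      rw [hLO, List.length_map, pvLen2]
      split_ifs <;> omega
    have hprefE : pvFill LO.length [] LE <+: LE.flatten := by
      simpa using pvFill_prefix LE [] LO.length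
    have hprefO : pvFill LE.length [] LO <+: LO.flatten := by
      simpa using pvFill_prefix LO [] LE.length
    have hfillE : LO.length ≤ (pvFill LO.length [] LE).length :=
      pvFill_length LE [] LO.length
        (by simp only [List.length_nil, Nat.zero_add, hlenO]; exact hE)
    have hfillO : LE.length ≤ (pvFill LE.length [] LO).length :=
      pvFill_length LO [] LE.length
        (by simp only [List.length_nil, Nat.zero_add, hlenE]; exact hO)
    show [0] ++ _ = [0] ++ _
    congr 1
    apply List.map_congr_left
    intro k hk
    rw [PySem.List.mem_pyRange_one] at hk
    lift k to Nat using (by omega)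
    rcases Nat.even_or_odd k with ⟨u, rfl⟩ | ⟨u, rfl⟩
    · -- k = u + u even, u ≥ 1: both take element u - 1 of the odd-register stream
      have hu : 1 ≤ u := by omega
      have hmod : PySem.Int.mod ((u + u : Nat) : Int) 2 = 0 := by
        rw [PySem.Int.mod_eq_emod_of_pos (by omega)]
        omega
      have hd : PySem.Int.floordiv ((u + u : Nat) : Int) 2 = (u : Int) := by
        rw [PySem.Int.floordiv_eq_ediv_of_pos (by omega)]
        omega
      simp only [hmod, hd]
      norm_num
      have h2 : ((u : Int) - 1) = ((u - 1 : Nat) : Int) := by omega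
      rw [h2, PySem.List.pyGetD_natCast]
      simpa [List.getD_eq_getElem?_getD] using pvPrefix_getD _ _ hprefE (u - 1) (by omega)
    · -- k = 2u + 1 odd: both take element u of the even-register stream
      have hmod : PySem.Int.mod ((2 * u + 1 : Nat) : Int) 2 = 1 := by
        rw [PySem.Int.mod_eq_emod_of_pos (by omega)]
        omega
      have hd : PySem.Int.floordiv (((2 * u + 1 : Nat) : Int) - 1) 2 = (u : Int) := by
        rw [PySem.Int.floordiv_eq_ediv_of_pos (by omega)]
        omega
      simp only [hmod, hd]
      norm_num
      simpa [List.getD_eq_getElem?_getD] using pvPrefix_getD _ _ hprefO u (by omega)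

-- ===== VERDICT (by name: the statement is the Claim_ definition above) =====
theorem associate_ancillae_spec : Claim_equal_associate_ancillae := by
  intro registers _hdom hpre
  exact pv_main registers hpre
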